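-- pv_equiv track=rewrite | github.com/jun25da/Research_about_music_sheet | MyApp.py | return_pitch_high
-- ===== SOURCE A (Python) =====
-- def return_pitch_high(notes_result): # 음에 따라 줄 높이 보정값 반환 (높은음자리표)
--         pitch_list = []
--         notes = notes_result
--         for note in notes:
--             if note[-1] == '4':
--                 if note[0] == "c":
--                     pitch_list.append(-16)
--                 elif note[0] == "d":
--                     pitch_list.append(-12)
--                 elif note[0] == "e":
--                      pitch_list.append(-8)
--                 elif note[0] == "f":
--                      pitch_list.append(-4)
--                 elif note[0] == "g":
--                      pitch_list.append(0)
--                 elif note[0] == "a":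
--                      pitch_list.append(4)
--                 elif note[0] == "b":
--                      pitch_list.append(8)
--
--             elif note[-1] == '3':
--                 if note[0] == "c":
--                     pitch_list.append(-44)
--                 elif note[0] == "d":
--                     pitch_list.append(-40)
--                 elif note[0] == "e":
--                      pitch_list.append(-36)
--                 elif note[0] == "f":
--                      pitch_list.append(-32)
--                 elif note[0] == "g":
--                      pitch_list.append(-28)
--                 elif note[0] == "a":
--                      pitch_list.append(-24)
--                 elif note[0] == "b":
--                      pitch_list.append(-20)
--
--             elif note[-1] == '5':
--                 if note[0] == "c":
--                     pitch_list.append(12)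
--                 elif note[0] == "d":
--                     pitch_list.append(16)
--                 elif note[0] == "e":
--                      pitch_list.append(20)
--                 elif note[0] == "f":
--                      pitch_list.append(24)
--                 elif note[0] == "g":
--                      pitch_list.append(28)
--                 elif note[0] == "a":
--                      pitch_list.append(32)
--                 elif note[0] == "b":
--                      pitch_list.append(36)
--
--             elif int(note[-1]) >= 6:
--                 pitch_list.append(36)
--
--             elif int(note[-1]) <= 2:
--                 pitch_list.append(-44)
--
--         return pitch_list
-- ===== SOURCE B (Python) =====
-- def return_pitch_high(notes_result):  # closed-form offset instead of a case table
--     pitch_list = []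
--     for note in notes_result:
--         octv = note[-1]
--         if octv in '345':
--             i = 'cdefgab'.find(note[0])
--             if i >= 0:
--                 pitch_list.append(i * 4 - 16 + (int(octv) - 4) * 28)
--         elif int(octv) >= 6:
--             pitch_list.append(36)
--         elif int(octv) <= 2:
--             pitch_list.append(-44)
--     return pitch_list
-- ===== Notes on version B (the rewrite author's own statement) =====
-- stated objective: simpler
-- what changed: Replaces the 21-branch per-note case table with a closed-form offset: 'cdefgab'.find(letter)*4 - 16 + (octave-4)*28 for octaves 3/4/5, plus the >=6/<=2 clamp.
import Mathlib
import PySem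

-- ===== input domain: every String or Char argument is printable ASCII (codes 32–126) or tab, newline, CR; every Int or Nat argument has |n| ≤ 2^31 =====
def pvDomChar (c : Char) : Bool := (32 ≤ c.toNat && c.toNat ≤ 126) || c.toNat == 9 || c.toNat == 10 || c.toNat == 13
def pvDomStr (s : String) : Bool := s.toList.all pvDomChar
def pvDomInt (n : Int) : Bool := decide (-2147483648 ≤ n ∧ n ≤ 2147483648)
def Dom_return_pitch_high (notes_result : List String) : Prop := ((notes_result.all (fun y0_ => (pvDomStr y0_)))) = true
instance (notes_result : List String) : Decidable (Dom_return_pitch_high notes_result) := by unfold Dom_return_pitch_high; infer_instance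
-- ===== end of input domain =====

-- B replaces A's 21-branch per-note case table with a closed-form offset ('cdefgab' index * 4 - 16 + (octave-4)*28): simpler, same cost.


-- ===== PORT A =====
-- step for one note: the if/elif case table of A
def pvStepA (acc : List Int) (note : String) : List Int :=
  match PySem.Str.pyGet? note (-1) with
  | none => acc  -- IndexError (empty note): outside Pre_
  | some last =>
    if last = '4' then
      match PySem.Str.pyGet? note 0 with
      | none => acc
      | some c0 =>
        if c0 = 'c' then acc ++ [-16]
        else if c0 = 'd' then acc ++ [-12]
        else if c0 = 'e' then acc ++ [-8]
        else if c0 = 'f' then acc ++ [-4]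
        else if c0 = 'g' then acc ++ [0]
        else if c0 = 'a' then acc ++ [4]
        else if c0 = 'b' then acc ++ [8]
        else acc
    else if last = '3' then
      match PySem.Str.pyGet? note 0 with
      | none => acc
      | some c0 =>
        if c0 = 'c' then acc ++ [-44]
        else if c0 = 'd' then acc ++ [-40]
        else if c0 = 'e' then acc ++ [-36]
        else if c0 = 'f' then acc ++ [-32]
        else if c0 = 'g' then acc ++ [-28]
        else if c0 = 'a' then acc ++ [-24]
        else if c0 = 'b' then acc ++ [-20]
        else acc
    else if last = '5' then
      match PySem.Str.pyGet? note 0 with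
      | none => acc
      | some c0 =>
        if c0 = 'c' then acc ++ [12]
        else if c0 = 'd' then acc ++ [16]
        else if c0 = 'e' then acc ++ [20]
        else if c0 = 'f' then acc ++ [24]
        else if c0 = 'g' then acc ++ [28]
        else if c0 = 'a' then acc ++ [32]
        else if c0 = 'b' then acc ++ [36]
        else acc
    else
      match PySem.Int.ofStr? (String.ofList [last]) with
      | none => acc  -- ValueError: outside Pre_
      | some o =>
        if o ≥ 6 then acc ++ [36]
        else if o ≤ 2 then acc ++ [-44]
        else acc

def return_pitch_high (notes_result : List String) : List Int :=
  notes_result.foldl pvStepA []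

-- ===== PORT B =====
-- step for one note: closed-form offset
def pvStepB (acc : List Int) (note : String) : List Int :=
  match PySem.Str.pyGet? note (-1) with
  | none => acc  -- IndexError (empty note): outside Pre_
  | some octv =>
    if PySem.Str.isIn (String.ofList [octv]) "345" then
      match PySem.Str.pyGet? note 0 with
      | none => acc
      | some c0 =>
        let i := PySem.Str.find "cdefgab" (String.ofList [c0])
        if i ≥ 0 then
          match PySem.Int.ofStr? (String.ofList [octv]) with
          | none => acc
          | some o => acc ++ [i * 4 - 16 + (o - 4) * 28]
        else acc
    else
      match PySem.Int.ofStr? (String.ofList [octv]) with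
      | none => acc  -- ValueError: outside Pre_
      | some o =>
        if o ≥ 6 then acc ++ [36]
        else if o ≤ 2 then acc ++ [-44]
        else acc

def return_pitch_high_alt (notes_result : List String) : List Int :=
  notes_result.foldl pvStepB []

-- ===== PRECONDITION & SPEC =====
-- Pre_ excludes exactly the inputs where A raises: a note that is empty (IndexError on note[-1])
-- or whose last character is not a decimal digit (ValueError from int(note[-1])). B raises there too.
def Pre_return_pitch_high (notes_result : List String) : Prop :=
  ∀ note ∈ notes_result,
    (match PySem.Str.pyGet? note (-1) with
     | some c => ('0' ≤ c && c ≤ '9')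
     | none => false) = true
instance (notes_result : List String) : Decidable (Pre_return_pitch_high notes_result) := by
  unfold Pre_return_pitch_high; infer_instance

def pvWitness_return_pitch_high : List String := ["c4", "g5", "a3", "x4", "d7", "e0"]

def Spec_return_pitch_high (notes_result : List String) (out : List Int) : Prop := out = return_pitch_high_alt notes_result
instance (notes_result : List String) (out : List Int) : Decidable (Spec_return_pitch_high notes_result out) := by unfold Spec_return_pitch_high; infer_instance

-- ===== CLAIM (what is proved, stated in full; the proofs are below) =====
def Claim_equal_return_pitch_high : Prop := ∀ (notes_result : List String), Dom_return_pitch_high notes_result → Pre_return_pitch_high notes_result → Spec_return_pitch_high notes_result (return_pitch_high notes_result)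

-- ===== LEMMAS AND PROOFS =====

-- a char between '0' and '9' is one of the ten digit characters
lemma pv_char_eq (c d : Char) (h : c.val.toNat = d.val.toNat) : c = d :=
  Char.ext (UInt32.toNat_inj.mp h)

lemma pv_digit_cases (c : Char) (h : ('0' ≤ c && c ≤ '9') = true) :
    c ∈ ['0','1','2','3','4','5','6','7','8','9'] := by
  simp only [Bool.and_eq_true, decide_eq_true_eq] at h
  obtain ⟨h1, h2⟩ := h
  rw [Char.le_def] at h1 h2
  have hv1 : 48 ≤ c.val.toNat := h1
  have hv2 : c.val.toNat ≤ 57 := h2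
  have hd : c.val.toNat = 48 ∨ c.val.toNat = 49 ∨ c.val.toNat = 50 ∨ c.val.toNat = 51 ∨
      c.val.toNat = 52 ∨ c.val.toNat = 53 ∨ c.val.toNat = 54 ∨ c.val.toNat = 55 ∨
      c.val.toNat = 56 ∨ c.val.toNat = 57 := by omega
  rcases hd with h|h|h|h|h|h|h|h|h|h
  · simp [pv_char_eq c '0' (by rw [h]; decide)]
  · simp [pv_char_eq c '1' (by rw [h]; decide)]
  · simp [pv_char_eq c '2' (by rw [h]; decide)]
  · simp [pv_char_eq c '3' (by rw [h]; decide)]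
  · simp [pv_char_eq c '4' (by rw [h]; decide)]
  · simp [pv_char_eq c '5' (by rw [h]; decide)]
  · simp [pv_char_eq c '6' (by rw [h]; decide)]
  · simp [pv_char_eq c '7' (by rw [h]; decide)]
  · simp [pv_char_eq c '8' (by rw [h]; decide)]
  · simp [pv_char_eq c '9' (by rw [h]; decide)]

-- a nonempty note has a first character
lemma pv_head (note : String) (last : Char)
    (hg : PySem.Str.pyGet? note (-1) = some last) :
    ∃ c0, PySem.Str.pyGet? note 0 = some c0 := by
  simp only [PySem.Str.pyGet?_eq, PySem.Chars.pyGet?_eq_listPyGet?] at hg ⊢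
  rw [PySem.List.pyGet?_neg_one] at hg
  cases hcs : note.toList with
  | nil => rw [hcs] at hg; simp at hg
  | cons c0 rest => exact ⟨c0, by rw [PySem.List.pyGet?_zero]; simp⟩

-- the letter offset: A's nested if-chain equals B's find-based formula, for each octave
lemma pv_letters (acc : List Int) (c0 : Char) (o vc vd ve vf vg va vb : Int)
    (h : vc = 0 * 4 - 16 + (o - 4) * 28 ∧ vd = 1 * 4 - 16 + (o - 4) * 28 ∧
         ve = 2 * 4 - 16 + (o - 4) * 28 ∧ vf = 3 * 4 - 16 + (o - 4) * 28 ∧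
         vg = 4 * 4 - 16 + (o - 4) * 28 ∧ va = 5 * 4 - 16 + (o - 4) * 28 ∧
         vb = 6 * 4 - 16 + (o - 4) * 28) :
    (if c0 = 'c' then acc ++ [vc]
     else if c0 = 'd' then acc ++ [vd]
     else if c0 = 'e' then acc ++ [ve]
     else if c0 = 'f' then acc ++ [vf]
     else if c0 = 'g' then acc ++ [vg]
     else if c0 = 'a' then acc ++ [va]
     else if c0 = 'b' then acc ++ [vb]
     else acc) =
    (if PySem.Str.find "cdefgab" (String.ofList [c0]) ≥ 0 then
       acc ++ [PySem.Str.find "cdefgab" (String.ofList [c0]) * 4 - 16 + (o - 4) * 28]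
     else acc) := by
  obtain ⟨hc, hd, he, hf, hg, ha, hb⟩ := h
  subst hc hd he hf hg ha hb
  by_cases h1 : c0 = 'c'
  · subst h1; rw [show PySem.Str.find "cdefgab" (String.ofList ['c']) = 0 from by decide]; norm_num
  by_cases h2 : c0 = 'd'
  · subst h2; rw [show PySem.Str.find "cdefgab" (String.ofList ['d']) = 1 from by decide]; norm_num [h1]
  by_cases h3 : c0 = 'e'
  · subst h3; rw [show PySem.Str.find "cdefgab" (String.ofList ['e']) = 2 from by decide]; norm_num [h1, h2]
  by_cases h4 : c0 = 'f'
  · subst h4; rw [show PySem.Str.find "cdefgab" (String.ofList ['f']) = 3 from by decide]; norm_num [h1, h2, h3]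
  by_cases h5 : c0 = 'g'
  · subst h5; rw [show PySem.Str.find "cdefgab" (String.ofList ['g']) = 4 from by decide]; norm_num [h1, h2, h3, h4]
  by_cases h6 : c0 = 'a'
  · subst h6; rw [show PySem.Str.find "cdefgab" (String.ofList ['a']) = 5 from by decide]; norm_num [h1, h2, h3, h4, h5]
  by_cases h7 : c0 = 'b'
  · subst h7; rw [show PySem.Str.find "cdefgab" (String.ofList ['b']) = 6 from by decide]; norm_num [h1, h2, h3, h4, h5, h6]
  have hfind : PySem.Str.find "cdefgab" (String.ofList [c0]) = -1 := by
    rw [PySem.Str.find_eq_neg_one_iff]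
    simp [List.singleton_infix_iff, show "cdefgab".toList = ['c','d','e','f','g','a','b'] from by decide]
    tauto
  rw [hfind]
  simp [h1, h2, h3, h4, h5, h6, h7]

-- per-note step equality under the digit-last condition
lemma pv_step_eq (acc : List Int) (note : String)
    (h : (match PySem.Str.pyGet? note (-1) with
          | some c => ('0' ≤ c && c ≤ '9')
          | none => false) = true) :
    pvStepA acc note = pvStepB acc note := by
  unfold pvStepA pvStepB
  cases hg : PySem.Str.pyGet? note (-1) with
  | none => rfl
  | some last =>
    rw [hg] at h
    obtain ⟨c0, hc0⟩ := pv_head note last hg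
    have hdig := pv_digit_cases last h
    fin_cases hdig
    · rfl
    · rfl
    · rfl
    · simp only [hc0, Char.reduceEq, reduceIte]
      exact pv_letters acc c0 3 _ _ _ _ _ _ _
        ⟨by norm_num, by norm_num, by norm_num, by norm_num, by norm_num, by norm_num, by norm_num⟩
    · simp only [hc0, Char.reduceEq, reduceIte]
      exact pv_letters acc c0 4 _ _ _ _ _ _ _
        ⟨by norm_num, by norm_num, by norm_num, by norm_num, by norm_num, by norm_num, by norm_num⟩
    · simp only [hc0, Char.reduceEq, reduceIte]
      exact pv_letters acc c0 5 _ _ _ _ _ _ _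
        ⟨by norm_num, by norm_num, by norm_num, by norm_num, by norm_num, by norm_num, by norm_num⟩
    · rfl
    · rfl
    · rfl
    · rfl

-- fold the step equality over the list
lemma pv_fold_eq (ns : List String)
    (hpre : ∀ note ∈ ns, (match PySem.Str.pyGet? note (-1) with
          | some c => ('0' ≤ c && c ≤ '9')
          | none => false) = true) :
    ∀ acc, ns.foldl pvStepA acc = ns.foldl pvStepB acc := by
  induction ns with
  | nil => intro _; rfl
  | cons n t ih =>
    intro acc
    simp only [List.foldl_cons]
    rw [pv_step_eq acc n (hpre n (by simp))]
    exact ih (fun m hm => hpre m (List.mem_cons_of_mem _ hm)) _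

-- ===== VERDICT (by name: the statement is the Claim_ definition above) =====
theorem return_pitch_high_spec : Claim_equal_return_pitch_high := by
  intro ns _ hpre
  unfold Spec_return_pitch_high return_pitch_high return_pitch_high_alt
  exact pv_fold_eq ns hpre []
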